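-- pv_equiv track=rewrite | github.com/carbon-language/carbon-lang | llvm-libgcc/generate_version_script.py | invert_mapping
-- ===== SOURCE A (Python) =====
-- from collections import defaultdict
--
-- def invert_mapping(symbol_map):
--     """Transforms a map from Key->Value to Value->Key."""
--     store = defaultdict(list)
--     for symbol, (version, _) in symbol_map.items():
--         store[version].append(symbol)
--     result = []
--     for k, v in store.items():
--         v.sort()
--         result.append((k, v))
--     result.sort(key=lambda x: x[0])
--     return result
-- ===== SOURCE B (Python) =====
-- def invert_mapping(symbol_map):
--     """Transforms a map from Key->Value to Value->Key."""
--     pairs = sorted((version, symbol) for symbol, (version, _) in symbol_map.items())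
--     result = []
--     for version, symbol in pairs:
--         if result and result[-1][0] == version:
--             result[-1][1].append(symbol)
--         else:
--             result.append((version, [symbol]))
--     return result
-- ===== Notes on version B (the rewrite author's own statement) =====
-- stated objective: alternative
-- what changed: Replaces A's group-into-a-defaultdict / sort-each-group / final-re-sort pipeline with one sort of (version, symbol) pairs followed by a single linear grouping pass that appends to the last group or opens a new one.
import Mathlib
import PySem

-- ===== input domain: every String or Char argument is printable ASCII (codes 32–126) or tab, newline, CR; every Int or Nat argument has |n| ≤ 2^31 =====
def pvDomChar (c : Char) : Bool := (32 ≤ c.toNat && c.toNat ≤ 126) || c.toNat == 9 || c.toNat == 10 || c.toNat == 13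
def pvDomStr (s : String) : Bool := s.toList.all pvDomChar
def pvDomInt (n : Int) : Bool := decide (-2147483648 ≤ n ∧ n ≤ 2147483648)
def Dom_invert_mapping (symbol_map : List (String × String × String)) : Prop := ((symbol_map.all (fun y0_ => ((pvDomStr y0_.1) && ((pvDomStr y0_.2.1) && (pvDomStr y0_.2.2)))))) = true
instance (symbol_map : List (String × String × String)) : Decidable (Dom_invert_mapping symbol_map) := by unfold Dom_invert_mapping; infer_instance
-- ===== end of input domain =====

-- B replaces A's group-into-a-defaultdict / sort-each-group / re-sort pipeline by one sort of
-- (version, symbol) pairs followed by a single linear grouping pass (objective: alternative).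

-- ===== PORT A =====
-- the dict argument is received as an association list; PySem.Dict.ofList rebuilds the Python dict
def invert_mapping (symbol_map : List (String × String × String)) : List (String × List String) :=
  let store := (PySem.Dict.ofList symbol_map).items.foldl
      (fun d p => d.modify p.2.1 [] (fun v => v ++ [p.1])) PySem.Dict.empty
  let result := store.items.foldl
      (fun acc kv => acc ++ [(kv.1, PySem.List.sorted kv.2 (fun x => x) false)]) []
  PySem.List.sorted result (fun x => x.1) false

-- ===== PORT B =====
-- B's loop body: either extend the group of result[-1] or open a new group
def altStep (acc : List (String × List String)) (p : String × String) : List (String × List String) :=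
  match acc.getLast? with
  | some q => if q.1 == p.1 then acc.dropLast ++ [(q.1, q.2 ++ [p.2])] else acc ++ [(p.1, [p.2])]
  | none => acc ++ [(p.1, [p.2])]

def invert_mapping_alt (symbol_map : List (String × String × String)) : List (String × List String) :=
  let pairs := PySem.List.sorted2 ((PySem.Dict.ofList symbol_map).items.map (fun p => (p.2.1, p.1)))
      (fun q => q.1) (fun q => q.2) false
  pairs.foldl altStep []

-- ===== PRECONDITION & SPEC =====
def Spec_invert_mapping (symbol_map : List (String × String × String)) (out : List (String × List String)) : Prop := out = invert_mapping_alt symbol_map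
instance (symbol_map : List (String × String × String)) (out : List (String × List String)) : Decidable (Spec_invert_mapping symbol_map out) := by unfold Spec_invert_mapping; infer_instance

-- ===== CLAIM (what is proved, stated in full; the proofs are below) =====
def Claim_equal_invert_mapping : Prop := ∀ (symbol_map : List (String × String × String)), Dom_invert_mapping symbol_map → Spec_invert_mapping symbol_map (invert_mapping symbol_map)

-- ===== LEMMAS AND PROOFS =====

-- A's side: the whole pipeline, stated over the rebuilt dict's item list, equals
-- "map each version of the sorted distinct versions to its sorted symbols"
theorem invert_mapping_core (items : List (String × String × String)) :
    PySem.List.sorted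
      ((items.foldl (fun d p => d.modify p.2.1 [] (fun w => w ++ [p.1])) PySem.Dict.empty).items.foldl
        (fun acc kv => acc ++ [(kv.1, PySem.List.sorted kv.2 (fun x => x) false)]) [])
      (fun x => x.1) false
    = (PySem.List.sorted (PySem.Set.ofList (items.map (fun p => p.2.1))) (fun x => x) false).map
        (fun v => (v, PySem.List.sorted ((items.filter (fun p => p.2.1 == v)).map (fun p => p.1)) (fun x => x) false)) := by
  set store := items.foldl (fun d p => d.modify p.2.1 [] (fun w => w ++ [p.1])) PySem.Dict.empty with hst
  set V := PySem.Set.ofList (items.map (fun p => p.2.1)) with hV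
  set g := fun v => (v, PySem.List.sorted ((items.filter (fun p => p.2.1 == v)).map (fun p => p.1)) (fun x => x) false) with hg
  -- A's grouping dict has the distinct versions as keys (first-occurrence order), without duplicates
  have hnodup : store.keys.Nodup :=
    PySem.Dict.nodup_keys_foldl_modify_key items (fun p => p.2.1) _ _ _ PySem.Dict.nodup_keys_empty
  have hkeys : store.keys = V := by
    have h := PySem.Dict.keys_foldl_modify_key (l := items) (key := fun p => p.2.1)
      (d0 := ([] : List String)) (f := fun _ p => (fun w => w ++ [p.1])) (d := PySem.Dict.empty)
    simpa [PySem.Dict.keys_empty, PySem.Set.ofList_eq_foldl, PySem.Set.update] using h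
  -- and at each version it stores exactly that version's symbols, in items order
  have hgetD : ∀ v, store.getD v [] = (items.filter (fun p => p.2.1 == v)).map (fun p => p.1) := by
    intro v
    have h := PySem.Dict.getD_foldl_modify_append (l := items.map (fun p => (p.2.1, p.1)))
      (d := PySem.Dict.empty) (c := v)
    rw [List.foldl_map] at h
    simpa [List.filter_map, Function.comp] using h
  rw [PySem.List.foldl_append_singleton_eq_map]
  rw [List.nil_append]
  have hitems := PySem.Dict.items_eq_map_keys store hnodup ([] : List String)
  rw [hitems]
  rw [List.map_map]
  have hmap : store.keys.map ((fun kv => (kv.1, PySem.List.sorted kv.2 (fun x => x) false)) ∘ fun k => (k, store.getD k [])) = V.map g := by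
    rw [hkeys]; exact List.map_congr_left (fun v _ => by simp [hgetD v, hg])
  rw [hmap]
  -- A's final sort of the (version, symbols) pairs is the map over the sorted distinct versions
  apply PySem.List.sorted_eq_of_perm_of_pairwise_lt
  · exact (PySem.List.sorted_perm V (fun x => x) false).map g
  · have hp : (PySem.List.sorted V (fun x => x) false).Pairwise (· < ·) := by
      rw [hV]; exact PySem.List.sorted_ofList_pairwise_lt (items.map (fun p => p.2.1))
    exact List.Pairwise.map g (fun a b h => by simpa [hg] using h) hp

-- B's side, step 1: Python's tuple sort is a sort under the lexicographic key
theorem sorted2_eq_sorted_toLex {α κ₁ κ₂ : Type} [LinearOrder κ₁] [LinearOrder κ₂]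
    (xs : List α) (k1 : α → κ₁) (k2 : α → κ₂) :
    PySem.List.sorted2 xs k1 k2 false = PySem.List.sorted xs (fun a => toLex (k1 a, k2 a)) false := by
  have hb : (fun a b => decide (k1 a < k1 b) || (!decide (k1 b < k1 a) && decide (k2 a < k2 b)))
      = (fun a b => decide ((fun a => toLex (k1 a, k2 a)) a < (fun a => toLex (k1 a, k2 a)) b)) := by
    funext a b
    simp only [Prod.Lex.lt_iff]
    rcases lt_trichotomy (k1 a) (k1 b) with h | h | h
    · simp [h, not_lt.2 (le_of_lt h)]
    · simp [h]
    · simp [not_lt.2 (le_of_lt h), ne_of_gt h, h]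
  simp only [PySem.List.sorted2, PySem.List.sorted, if_neg (by decide : ¬ (false = true))]
  rw [hb]

-- a Nodup list of group keys covering every element splits a list into its filter classes
theorem flatMap_filter_perm {α κ : Type} [DecidableEq κ] (k : α → κ) :
    ∀ (vs : List κ) (items : List α), vs.Nodup → (∀ p ∈ items, k p ∈ vs) →
      (vs.flatMap (fun v => items.filter (fun p => k p = v))).Perm items := by
  intro vs
  induction vs with
  | nil => intro items _ hall; simp [List.eq_nil_iff_forall_not_mem.2 (fun p hp => by simpa using hall p hp)]
  | cons v vs' ih =>
    intro items hnd hall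
    simp only [List.flatMap_cons]
    have h1 : ∀ u ∈ vs', (items.filter (fun p => decide (k p = u)))
        = ((items.filter (fun p => !decide (k p = v))).filter (fun p => decide (k p = u))) := by
      intro u hu
      rw [List.filter_filter]
      apply List.filter_congr
      intro p _
      rcases eq_or_ne (k p) u with h | h
      · have hne : k p ≠ v := by rintro rfl; exact (List.nodup_cons.1 hnd).1 (h ▸ hu)
        subst h
        simp [hne]
      · simp [h]
    have h2 : (vs'.flatMap (fun u => items.filter (fun p => k p = u))).Perm
        (items.filter (fun p => !decide (k p = v))) := by
      have heq : vs'.flatMap (fun u => items.filter (fun p => k p = u))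
          = vs'.flatMap (fun u => (items.filter (fun p => !decide (k p = v))).filter (fun p => k p = u)) := by
        rw [List.flatMap_def, List.flatMap_def, List.map_congr_left h1]
      rw [heq]
      exact ih (items.filter (fun p => !decide (k p = v))) (List.nodup_cons.1 hnd).2
        (fun p hp => by
          have hm := List.of_mem_filter hp
          have hmem := hall p (List.mem_of_mem_filter hp)
          simp only [List.mem_cons] at hmem
          rcases hmem with h | h
          · simp [h] at hm
          · exact h)
    exact ((List.Perm.append_left _ h2).trans (List.filter_append_perm (fun p => decide (k p = v)) items))

-- B's grouping pass over one block of pairs sharing the version v extends the last group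
theorem foldl_altStep_block (v : String) (syms : List String) :
    ∀ (acc : List (String × List String)) (g0 : List String),
      List.foldl altStep (acc ++ [(v, g0)]) (syms.map (fun s => (v, s)))
        = acc ++ [(v, g0 ++ syms)] := by
  induction syms with
  | nil => intro acc g0; simp
  | cons s rest ih =>
    intro acc g0
    simp only [List.map_cons, List.foldl_cons]
    have hstep : altStep (acc ++ [(v, g0)]) (v, s) = acc ++ [(v, g0 ++ [s])] := by
      simp [altStep, List.getLast?_concat, List.dropLast_concat]
    rw [hstep, ih acc (g0 ++ [s])]
    simp

-- B's grouping pass over the concatenated blocks produces one group per version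
theorem foldl_altStep_groups (f : String → List String) :
    ∀ (vs : List String) (acc : List (String × List String)),
      vs.Pairwise (· ≠ ·) → (∀ v ∈ vs, f v ≠ []) →
      (∀ v ∈ vs, ∀ q, acc.getLast? = some q → q.1 ≠ v) →
      List.foldl altStep acc (vs.flatMap (fun v => (f v).map (fun s => (v, s))))
        = acc ++ vs.map (fun v => (v, f v)) := by
  intro vs
  induction vs with
  | nil => intro acc _ _ _; simp
  | cons v vs' ih =>
    intro acc hpw hne hlast
    simp only [List.flatMap_cons, List.foldl_append]
    obtain ⟨s0, rest, hf⟩ : ∃ s0 rest, f v = s0 :: rest :=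
      List.exists_cons_of_ne_nil (hne v (List.mem_cons_self))
    have hfirst : altStep acc (v, s0) = acc ++ [(v, [s0])] := by
      cases hacc : acc.getLast? with
      | none => simp [altStep, hacc]
      | some q =>
        have : q.1 ≠ v := hlast v List.mem_cons_self q hacc
        simp [altStep, hacc, this]
    have hblock : List.foldl altStep acc ((f v).map (fun s => (v, s))) = acc ++ [(v, f v)] := by
      rw [hf]
      simp only [List.map_cons, List.foldl_cons, hfirst]
      have := foldl_altStep_block v rest acc [s0]
      simpa using this
    rw [hblock]
    rw [ih (acc ++ [(v, f v)]) (List.pairwise_cons.1 hpw).2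
      (fun u hu => hne u (List.mem_cons_of_mem _ hu))
      (fun u hu q hq => by
        rw [List.getLast?_concat] at hq
        cases hq
        exact (List.pairwise_cons.1 hpw).1 u hu)]
    simp

-- B's side: sort-then-group equals "map each version of the sorted distinct versions to its sorted symbols"
theorem alt_core (items : List (String × String × String))
    (hnd : (items.map (fun p => p.1)).Nodup) :
    (PySem.List.sorted2 (items.map (fun p => (p.2.1, p.1))) (fun q => q.1) (fun q => q.2) false).foldl altStep []
      = (PySem.List.sorted (PySem.Set.ofList (items.map (fun p => p.2.1))) (fun x => x) false).map
          (fun v => (v, PySem.List.sorted ((items.filter (fun p => p.2.1 == v)).map (fun p => p.1)) (fun x => x) false)) := by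
  set V := PySem.Set.ofList (items.map (fun p => p.2.1)) with hV
  set SV := PySem.List.sorted V (fun x => x) false with hSV
  set f := fun v => PySem.List.sorted ((items.filter (fun p => p.2.1 == v)).map (fun p => p.1)) (fun x => x) false with hf
  have hSVlt : SV.Pairwise (· < ·) := by
    rw [hSV, hV]; exact PySem.List.sorted_ofList_pairwise_lt (items.map (fun p => p.2.1))
  have hSVnd : SV.Nodup := hSVlt.imp (fun h => ne_of_lt h)
  have hmemSV : ∀ p ∈ items, p.2.1 ∈ SV := by
    intro p hp
    rw [hSV, PySem.List.mem_sorted, hV]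
    rw [PySem.Set.mem_ofList]
    exact List.mem_map_of_mem hp
  have hfnd : ∀ v, (f v).Nodup := by
    intro v
    rw [hf]
    have hsub : ((items.filter (fun p => p.2.1 == v)).map (fun p => p.1)).Sublist (items.map (fun p => p.1)) :=
      List.Sublist.map (fun p => p.1) (List.filter_sublist (p := fun p => p.2.1 == v) (l := items))
    exact ((PySem.List.sorted_perm _ _ _).nodup_iff).2 (hsub.nodup hnd)
  have hfle : ∀ v, (f v).Pairwise (· ≤ ·) := fun v => PySem.List.sorted_pairwise _ _
  have hflt : ∀ v, (f v).Pairwise (· < ·) :=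
    fun v => ((hfnd v).and (hfle v)).imp (fun h => lt_of_le_of_ne h.2 h.1)
  have hfmem : ∀ v s, s ∈ f v ↔ ∃ p ∈ items, p.2.1 = v ∧ p.1 = s := by
    intro v s
    rw [hf, PySem.List.mem_sorted]
    simp [List.mem_map, List.mem_filter, beq_iff_eq]
  -- the sorted pair list is the concatenation of the per-version blocks
  have hpairs : PySem.List.sorted2 (items.map (fun p => (p.2.1, p.1))) (fun q => q.1) (fun q => q.2) false
      = SV.flatMap (fun v => (f v).map (fun s => (v, s))) := by
    rw [sorted2_eq_sorted_toLex]
    apply PySem.List.sorted_eq_of_perm_of_pairwise_lt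
    · -- it is a permutation of the pair list
      have hinner : ∀ v ∈ SV, ((f v).map (fun s => (v, s))).Perm
          ((items.filter (fun p => decide (p.2.1 = v))).map (fun p => (p.2.1, p.1))) := by
        intro v _
        have h1 : ((items.filter (fun p => decide (p.2.1 = v))).map (fun p => (p.2.1, p.1)))
            = ((items.filter (fun p => p.2.1 == v)).map (fun p => p.1)).map (fun s => (v, s)) := by
          rw [List.map_map]
          apply List.map_congr_left
          intro p hp
          have := List.of_mem_filter hp
          simp only [decide_eq_true_eq] at this
          simp [this]
        rw [h1]
        exact ((PySem.List.sorted_perm _ _ _).map _)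
      have hperm1 : (SV.flatMap (fun v => (f v).map (fun s => (v, s)))).Perm
          (SV.flatMap (fun v => (items.filter (fun p => decide (p.2.1 = v))).map (fun p => (p.2.1, p.1)))) := by
        exact List.Perm.flatMap_left SV hinner
      refine hperm1.trans ?_
      rw [← List.map_flatMap]
      exact (flatMap_filter_perm (fun p => p.2.1) SV items hSVnd hmemSV).map _
    · -- it is strictly increasing in the lexicographic key
      rw [List.flatMap_def, List.pairwise_flatten]
      constructor
      · intro l hl
        rw [List.mem_map] at hl
        obtain ⟨v, hv, rfl⟩ := hl
        rw [List.pairwise_map]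
        exact (hflt v).imp (fun h => by simp [Prod.Lex.lt_iff, h])
      · rw [List.pairwise_map]
        apply hSVlt.imp
        intro a b hab
        intro x hx y hy
        rw [List.mem_map] at hx hy
        obtain ⟨s, _, rfl⟩ := hx
        obtain ⟨t, _, rfl⟩ := hy
        simp [Prod.Lex.lt_iff, hab]
  rw [hpairs]
  have := foldl_altStep_groups f SV [] (hSVlt.imp (fun h => ne_of_lt h))
    (fun v hv => by
      rw [hSV, PySem.List.mem_sorted, hV, PySem.Set.mem_ofList, List.mem_map] at hv
      obtain ⟨p, hp, rfl⟩ := hv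
      intro hnil
      have : p.1 ∈ f p.2.1 := (hfmem p.2.1 p.1).2 ⟨p, hp, rfl, rfl⟩
      rw [hnil] at this
      exact List.not_mem_nil this)
    (fun v _ q hq => by simp at hq)
  simpa using this

-- ===== VERDICT (by name: the statement is the Claim_ definition above) =====
theorem invert_mapping_spec : Claim_equal_invert_mapping := by
  intro symbol_map _
  unfold Spec_invert_mapping invert_mapping invert_mapping_alt
  have hnd : (((PySem.Dict.ofList symbol_map).items).map (fun p => p.1)).Nodup := by
    have h := PySem.Dict.nodup_keys_ofList symbol_map
    simpa [PySem.Dict.keys] using h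
  exact (invert_mapping_core (PySem.Dict.ofList symbol_map).items).trans
    (alt_core (PySem.Dict.ofList symbol_map).items hnd).symm
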